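-- pv_equiv track=rewrite | github.com/borospeti/julekalender | adventofcode24/05/5.py | sum_mids
-- ===== SOURCE A (Python) =====
-- def check_update(rules, u):
--     for i in range(len(u) - 1):
--         for j in range(i + 1, len(u)):
--             if (u[j], u[i]) in rules:
--                 return False
--     return True
--
-- def sort_pages(rules, u):
--     s = [p for p in u]
--     for i in range(len(s) - 1):
--         swap = True
--         while swap:
--             swap = False
--             for j in range(i + 1, len(s)):
--                 if (s[j], s[i]) in rules:
--                     t = s[j]
--                     s[j] = s[i]
--                     s[i] = t
--                     swap = True
--                     break
--     return s
--
-- def sum_mids(rules, updates):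
--     good, bad = (0, 0)
--     for u in updates:
--         if check_update(rules, u):
--             good += u[len(u) // 2]
--         else:
--             v = sort_pages(rules, u)
--             bad += v[len(v) // 2]
--     return (good, bad)
-- ===== SOURCE B (Python) =====
-- def settle(rules, x, rest):
--     """Sink a candidate x through rest: whenever some y in rest must precede
--     the current candidate, y becomes the candidate, x takes y's place and the
--     scan restarts.  Returns the settled candidate and the leftover elements."""
--     scanned = []
--     while rest:
--         y, rest = rest[0], rest[1:]
--         if (y, x) in rules:
--             rest = scanned + [x] + rest
--             scanned = []
--             x = y
--         else:
--             scanned.append(y)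
--     return x, scanned
--
-- def sum_mids(rules, updates):
--     good, bad = 0, 0
--     for u in updates:
--         v, rest = [], list(u)
--         while rest:
--             x, rest = settle(rules, rest[0], rest[1:])
--             v.append(x)
--         m = v[len(v) // 2]
--         if v == u:
--             good += m
--         else:
--             bad += m
--     return good, bad
-- ===== Notes on version B (the rewrite author's own statement) =====
-- stated objective: alternative
-- what changed: check_update is eliminated (each update is reordered exactly once and classified good iff reordering left it unchanged) and the index-based in-place bubble passes are replaced by a recursive head-settling pass over a candidate/scanned/rest zipper of immutable lists.
-- outside the precondition, e.g. on sum_mids({(2, 3), (1, 2)}, [[3, 2, 1]]): A returns (0, 2), B returns (0, 2); on sum_mids({(1, 1)}, [[1]]): A returns (1, 0), B returns (1, 0)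
import Mathlib
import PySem

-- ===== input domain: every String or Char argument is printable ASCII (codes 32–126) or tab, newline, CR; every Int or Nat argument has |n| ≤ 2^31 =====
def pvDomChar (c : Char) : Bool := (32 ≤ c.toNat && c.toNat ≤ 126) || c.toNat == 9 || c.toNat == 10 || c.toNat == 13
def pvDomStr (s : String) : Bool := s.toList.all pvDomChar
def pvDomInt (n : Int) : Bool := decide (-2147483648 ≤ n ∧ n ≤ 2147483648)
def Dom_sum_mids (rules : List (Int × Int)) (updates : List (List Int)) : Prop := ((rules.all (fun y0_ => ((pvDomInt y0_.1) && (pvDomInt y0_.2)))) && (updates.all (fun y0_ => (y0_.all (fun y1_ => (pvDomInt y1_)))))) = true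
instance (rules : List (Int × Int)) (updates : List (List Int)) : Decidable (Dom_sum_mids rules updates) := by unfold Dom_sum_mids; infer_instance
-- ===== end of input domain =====

-- B eliminates check_update (each update is reordered exactly once and classified good iff the
-- reordering left it unchanged) and replaces the index-based in-place bubble passes by a recursive
-- head-settling pass over a candidate/scanned/rest zipper of immutable lists.

-- ===== PORT A =====
-- the inner 'for j in range(i+1, len(s)): if (s[j], s[i]) in rules: … break'
-- scan of sort_pages, returning the first j that triggers a swap (none = the pass found no swap).
def pvFindJ (rules : List (Int × Int)) (s : List Int) (i j : Nat) : Option Nat :=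
  if j < s.length then
    if (s.getD j 0, s.getD i 0) ∈ rules then some j
    else pvFindJ rules s i (j + 1)
  else none
termination_by s.length - j

-- t = s[j]; s[j] = s[i]; s[i] = t
def pvSwap (s : List Int) (i j : Nat) : List Int :=
  (s.set i (s.getD j 0)).set j (s.getD i 0)

-- the 'while swap:' loop of sort_pages at stage i.  Python's while has no fuel; the fuel is a
-- port artifact and Pre_sum_mids (rules a strict partial order on each update) guarantees the
-- Python loop terminates, well within (len+1)^3 swaps.
def pvWhile (rules : List (Int × Int)) (fuel : Nat) (s : List Int) (i : Nat) : List Int :=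
  match pvFindJ rules s i (i + 1), fuel with
  | none, _ => s
  | some _, 0 => s
  | some j, fuel' + 1 => pvWhile rules fuel' (pvSwap s i j) i

def pvFuel (u : List Int) : Nat := (u.length + 1) * (u.length + 1) * (u.length + 1)

-- sort_pages
def pvSort (rules : List (Int × Int)) (u : List Int) : List Int :=
  (List.range (u.length - 1)).foldl (fun s i => pvWhile rules (pvFuel u) s i) u

-- the inner loop of check_update (false = early 'return False')
def pvCheckInner (rules : List (Int × Int)) (u : List Int) (i j : Nat) : Bool :=
  if j < u.length then
    if (u.getD j 0, u.getD i 0) ∈ rules then false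
    else pvCheckInner rules u i (j + 1)
  else true
termination_by u.length - j

def pvCheck (rules : List (Int × Int)) (u : List Int) : Bool :=
  (List.range (u.length - 1)).all (fun i => pvCheckInner rules u i (i + 1))

-- u[len(u) // 2]; Pre_ guarantees u ≠ [], so the index is in range and getD is exact
def pvMid (u : List Int) : Int := u.getD (u.length / 2) 0

def sum_mids (rules : List (Int × Int)) (updates : List (List Int)) : Int × Int :=
  updates.foldl
    (fun gb u =>
      if pvCheck rules u then (gb.1 + pvMid u, gb.2)
      else (gb.1, gb.2 + pvMid (pvSort rules u)))
    (0, 0)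

-- ===== PORT B =====
-- the body of B's settle loop: scan rest for the first y that must precede the candidate x.
-- inl (x, scanned ++ rest) = scan exhausted (loop exits); inr (y, scanned ++ x :: tail) = swap
-- found (y is the new candidate, x takes y's place, the scan restarts).
def pvScan (rules : List (Int × Int)) (x : Int) (scanned rest : List Int) :
    (Int × List Int) ⊕ (Int × List Int) :=
  match rest with
  | [] => Sum.inl (x, scanned)
  | y :: rest' =>
    if (y, x) ∈ rules then Sum.inr (y, scanned ++ x :: rest')
    else pvScan rules x (scanned ++ [y]) rest'

-- settle(rules, x, rest): one swap-restart iteration per fuel unit.  B's Python while has no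
-- fuel; the fuel (shared artifact with port A's pvWhile) counts swaps, and at fuel 0 the stage
-- stops with the current state, exactly as pvWhile does.
def pvSettle (rules : List (Int × Int)) (fuel : Nat) (x : Int) (rest : List Int) :
    Int × List Int :=
  match pvScan rules x [] rest with
  | Sum.inl r => r
  | Sum.inr (y, seg) =>
    match fuel with
    | 0 => (x, rest)
    | fuel' + 1 => pvSettle rules fuel' y seg

-- the 'while rest: x, rest = settle(...); v.append(x)' loop of B's sum_mids; the counter n
-- (instantiated with the list's length, which each settle preserves) drives the recursion.
def pvReorderN (rules : List (Int × Int)) (fuel : Nat) : Nat → List Int → List Int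
  | 0, _ => []
  | _ + 1, [] => []
  | n + 1, x :: rest =>
    let p := pvSettle rules fuel x rest
    p.1 :: pvReorderN rules fuel n p.2

def pvReorder (rules : List (Int × Int)) (fuel : Nat) (l : List Int) : List Int :=
  pvReorderN rules fuel l.length l

def sum_mids_alt (rules : List (Int × Int)) (updates : List (List Int)) : Int × Int :=
  updates.foldl
    (fun gb u =>
      let v := pvReorder rules (pvFuel u) u
      let m := v.getD (v.length / 2) 0
      if v = u then (gb.1 + m, gb.2) else (gb.1, gb.2 + m))
    (0, 0)

-- ===== PRECONDITION & SPEC =====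
-- Pre_ excludes (a) updates containing an empty list, on which A raises IndexError, and
-- (b) rules that are not irreflexive-and-transitive on the pages of each update: on cyclic
-- rules A's hand-rolled bubble sort loops forever, and irreflexivity+transitivity is the
-- simple checkable condition ruling that out (it also excludes some terminating
-- non-transitive inputs, e.g. the cites in claim.json, where A and B agree anyway).
def GoodUpd (rules : List (Int × Int)) (u : List Int) : Bool :=
  !u.isEmpty &&
  u.all (fun a => !rules.contains (a, a)) &&
  rules.all (fun p => rules.all (fun q =>
    !(p.2 == q.1 && u.contains p.1 && u.contains p.2 && u.contains q.2) || rules.contains (p.1, q.2)))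

def Pre_sum_mids (rules : List (Int × Int)) (updates : List (List Int)) : Prop :=
  updates.all (GoodUpd rules) = true

instance (rules : List (Int × Int)) (updates : List (List Int)) : Decidable (Pre_sum_mids rules updates) := by
  unfold Pre_sum_mids; infer_instance

def pvWitness_sum_mids : (List (Int × Int)) × List (List Int) := ([(1, 2)], [[1, 2], [2, 1]])

def Spec_sum_mids (rules : List (Int × Int)) (updates : List (List Int)) (out : Int × Int) : Prop := out = sum_mids_alt rules updates
instance (rules : List (Int × Int)) (updates : List (List Int)) (out : Int × Int) : Decidable (Spec_sum_mids rules updates out) := by unfold Spec_sum_mids; infer_instance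

-- ===== CLAIM (what is proved, stated in full; the proofs are below) =====
def Claim_equal_sum_mids : Prop := ∀ (rules : List (Int × Int)) (updates : List (List Int)), Dom_sum_mids rules updates → Pre_sum_mids rules updates → Spec_sum_mids rules updates (sum_mids rules updates)

-- ===== LEMMAS AND PROOFS =====

lemma goodUpd_irrefl {rules : List (Int × Int)} {u : List Int} (h : GoodUpd rules u = true) :
    ∀ a ∈ u, (a, a) ∉ rules := by
  simp [GoodUpd] at h
  exact h.1.2

lemma goodUpd_trans {rules : List (Int × Int)} {u : List Int} (h : GoodUpd rules u = true) :
    ∀ p ∈ rules, ∀ q ∈ rules, p.2 = q.1 → p.1 ∈ u → p.2 ∈ u → q.2 ∈ u → (p.1, q.2) ∈ rules := by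
  simp [GoodUpd] at h
  rintro ⟨a, b⟩ hp ⟨c, d⟩ hq he h1 h2 h3
  have := h.2 a b hp c d hq
  simp at he
  tauto

lemma pvCheckInner_eq_isNone (rules : List (Int × Int)) (u : List Int) (i j : Nat) :
    pvCheckInner rules u i j = (pvFindJ rules u i j).isNone := by
  fun_induction pvCheckInner rules u i j with
  | case1 j h1 h2 => rw [pvFindJ, if_pos h1, if_pos h2]; rfl
  | case2 j h1 h2 ih => rw [pvFindJ, if_pos h1, if_neg h2]; exact ih
  | case3 j h1 => rw [pvFindJ, if_neg h1]; rfl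

lemma pvFindJ_some (rules : List (Int × Int)) (s : List Int) (i : Nat) :
    ∀ (j j' : Nat), pvFindJ rules s i j = some j' →
    j ≤ j' ∧ j' < s.length ∧ (s.getD j' 0, s.getD i 0) ∈ rules := by
  intro j
  fun_induction pvFindJ rules s i j with
  | case1 j h1 h2 => intro j' he; simp at he; subst he; exact ⟨le_refl _, h1, h2⟩
  | case2 j h1 h2 ih => intro j' he; have := ih j' he; exact ⟨by omega, this.2.1, this.2.2⟩
  | case3 j h1 => intro j' he; simp at he

lemma pvSwap_length (s : List Int) (i j : Nat) : (pvSwap s i j).length = s.length := by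
  simp [pvSwap]

lemma pvSwap_mem (s : List Int) (i j : Nat) (hi : i < s.length) (hj : j < s.length) (x : Int)
    (hx : x ∈ pvSwap s i j) : x ∈ s := by
  unfold pvSwap at hx
  rcases List.mem_or_eq_of_mem_set hx with hx | rfl
  · rcases List.mem_or_eq_of_mem_set hx with hx | rfl
    · exact hx
    · rw [List.getD_eq_getElem _ _ hj]; exact List.getElem_mem hj
  · rw [List.getD_eq_getElem _ _ hi]; exact List.getElem_mem hi

lemma pvSwap_getD_lt (s : List Int) (i j k : Nat) (hki : k ≠ i) (hkj : k ≠ j) :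
    (pvSwap s i j).getD k 0 = s.getD k 0 := by
  simp [pvSwap, List.getD, List.getElem?_set_ne (by omega : j ≠ k), List.getElem?_set_ne (by omega : i ≠ k)]

lemma pvWhile_getD_lt (rules : List (Int × Int)) (fuel : Nat) (s : List Int) (i k : Nat)
    (hk : k < i) : (pvWhile rules fuel s i).getD k 0 = s.getD k 0 := by
  fun_induction pvWhile rules fuel s i with
  | case1 => rfl
  | case2 => rfl
  | case3 s j fuel' hfind ih =>
    rw [ih]
    have := pvFindJ_some _ _ _ _ _ hfind
    exact pvSwap_getD_lt _ _ _ _ (by omega) (by omega)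

lemma getD_mem (s : List Int) (k : Nat) (hk : k < s.length) : s.getD k 0 ∈ s := by
  rw [List.getD_eq_getElem _ _ hk]; exact List.getElem_mem hk

lemma pvSwap_getD_fst (s : List Int) (i j : Nat) (hij : i ≠ j) (hi : i < s.length) :
    (pvSwap s i j).getD i 0 = s.getD j 0 := by
  simp [pvSwap, List.getD, List.getElem?_set_ne (by omega : j ≠ i)]
  rw [List.getElem?_set_self]
  · simp
  · exact hi

-- invariant at stage i: the page now at position i is rules-below the original page u[i]
lemma pvWhile_inv (rules : List (Int × Int)) (u : List Int)
    (htrans : ∀ p ∈ rules, ∀ q ∈ rules, p.2 = q.1 → p.1 ∈ u → p.2 ∈ u → q.2 ∈ u → (p.1, q.2) ∈ rules)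
    (fuel : Nat) (s : List Int) (i : Nat)
    (hsub : ∀ x ∈ s, x ∈ u) (hlen : s.length = u.length) (hiu : i < u.length)
    (hinv : (s.getD i 0, u.getD i 0) ∈ rules) :
    ((pvWhile rules fuel s i).getD i 0, u.getD i 0) ∈ rules := by
  induction fuel generalizing s with
  | zero =>
    cases hf : pvFindJ rules s i (i + 1) <;> simpa [pvWhile, hf, List.getD] using hinv
  | succ fuel ih =>
    cases hf : pvFindJ rules s i (i + 1) with
    | none => simpa [pvWhile, hf, List.getD] using hinv
    | some j =>
      have hj := pvFindJ_some _ _ _ _ _ hf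
      have hstep : pvWhile rules (fuel + 1) s i = pvWhile rules fuel (pvSwap s i j) i := by
        simp [pvWhile, hf]
      rw [hstep]
      have hi : i < s.length := by omega
      have hij : i ≠ j := by omega
      have hgd : (pvSwap s i j).getD i 0 = s.getD j 0 := pvSwap_getD_fst s i j hij hi
      refine ih (pvSwap s i j) (fun x hx => hsub x (pvSwap_mem s i j hi hj.2.1 x hx))
        (by rw [pvSwap_length, hlen]) ?_
      rw [hgd]
      exact htrans _ hj.2.2 _ hinv rfl (hsub _ (getD_mem s j hj.2.1))
        (hsub _ (getD_mem s i hi)) (getD_mem u i hiu)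

lemma foldl_const {α β : Type} (f : α → β → α) (a : α) :
    ∀ l : List β, (∀ b ∈ l, f a b = a) → l.foldl f a = a := by
  intro l
  induction l with
  | nil => intro _; rfl
  | cons b l ih => intro h; simp [List.foldl, h b (by simp)]; exact ih fun c hc => h c (by simp [hc])

lemma foldl_getD_lt (rules : List (Int × Int)) (fuel : Nat) (k : Nat) :
    ∀ (l : List Nat) (r : List Int), (∀ i ∈ l, k < i) →
    (l.foldl (fun s i => pvWhile rules fuel s i) r).getD k 0 = r.getD k 0 := by
  intro l
  induction l with
  | nil => intro r _; rfl
  | cons i l ih =>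
    intro r h
    simp only [List.foldl]
    rw [ih _ fun m hm => h m (by simp [hm]), pvWhile_getD_lt rules fuel r i k (h i (by simp))]

lemma pvSort_of_check (rules : List (Int × Int)) (u : List Int)
    (h : pvCheck rules u = true) : pvSort rules u = u := by
  unfold pvSort
  apply foldl_const
  intro i hi
  have hc : pvCheckInner rules u i (i + 1) = true := by
    unfold pvCheck at h; rw [List.all_eq_true] at h; exact h i hi
  rw [pvCheckInner_eq_isNone] at hc
  unfold pvWhile
  cases hfind : pvFindJ rules u i (i + 1) with
  | none => rfl
  | some j => rw [hfind] at hc; simp at hc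

lemma pvSort_ne_of_check_false (rules : List (Int × Int)) (u : List Int)
    (hg : GoodUpd rules u = true) (hc : pvCheck rules u = false) : pvSort rules u ≠ u := by
  have hex : ∃ i, pvCheckInner rules u i (i + 1) = false := by
    unfold pvCheck at hc
    rw [List.all_eq_false] at hc
    obtain ⟨i, _, hi⟩ := hc
    exact ⟨i, by simpa using hi⟩
  obtain ⟨iw, hiwmem, hiw⟩ : ∃ i ∈ List.range (u.length - 1), pvCheckInner rules u i (i + 1) = false := by
    unfold pvCheck at hc
    rw [List.all_eq_false] at hc
    obtain ⟨i, h1, h2⟩ := hc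
    exact ⟨i, h1, by simpa using h2⟩
  set i0 := Nat.find hex with hi0def
  have hP : pvCheckInner rules u i0 (i0 + 1) = false := Nat.find_spec hex
  have hmin : ∀ m, m < i0 → pvCheckInner rules u m (m + 1) = true := by
    intro m hm
    have := Nat.find_min hex hm
    simpa using this
  have hi0lt : i0 < u.length - 1 := by
    have h1 : i0 ≤ iw := Nat.find_min' hex hiw
    have h2 : iw < u.length - 1 := List.mem_range.mp hiwmem
    omega
  have hi0u : i0 < u.length := by omega
  -- split the stage list at i0
  have hsplit : u.length - 1 = (i0 + 1) + (u.length - 1 - (i0 + 1)) := by omega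
  have hfold : pvSort rules u
      = ((List.range (u.length - 1 - (i0 + 1))).map (fun x => (i0 + 1) + x)).foldl
          (fun s i => pvWhile rules (pvFuel u) s i)
          (pvWhile rules (pvFuel u)
            ((List.range i0).foldl (fun s i => pvWhile rules (pvFuel u) s i) u) i0) := by
    unfold pvSort
    rw [hsplit, List.range_add, List.foldl_append, List.range_succ, List.foldl_append]
    simp
  -- stages before i0 do nothing
  have hpre0 : (List.range i0).foldl (fun s i => pvWhile rules (pvFuel u) s i) u = u := by
    apply foldl_const
    intro i hi
    have hct : pvCheckInner rules u i (i + 1) = true := hmin i (List.mem_range.mp hi)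
    rw [pvCheckInner_eq_isNone] at hct
    cases hfind : pvFindJ rules u i (i + 1) with
    | none => simp [pvWhile, hfind]
    | some j => rw [hfind] at hct; simp at hct
  -- stage i0 performs at least one swap and keeps position i0 rules-below u[i0]
  obtain ⟨j, hfind⟩ : ∃ j, pvFindJ rules u i0 (i0 + 1) = some j := by
    rw [pvCheckInner_eq_isNone] at hP
    cases hfind : pvFindJ rules u i0 (i0 + 1) with
    | none => rw [hfind] at hP; simp at hP
    | some j => exact ⟨j, rfl⟩
  have hj := pvFindJ_some _ _ _ _ _ hfind
  obtain ⟨K, hK⟩ : ∃ K, pvFuel u = K + 1 := by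
    have hpos : 0 < pvFuel u := by unfold pvFuel; positivity
    exact ⟨pvFuel u - 1, by omega⟩
  have hstage : ((pvWhile rules (pvFuel u) u i0).getD i0 0, u.getD i0 0) ∈ rules := by
    have hstep : pvWhile rules (pvFuel u) u i0 = pvWhile rules K (pvSwap u i0 j) i0 := by
      rw [hK]; simp [pvWhile, hfind]
    rw [hstep]
    refine pvWhile_inv rules u (goodUpd_trans hg) K (pvSwap u i0 j) i0
      (fun x hx => pvSwap_mem u i0 j hi0u hj.2.1 x hx)
      (pvSwap_length u i0 j) hi0u ?_
    rw [pvSwap_getD_fst u i0 j (by omega) hi0u]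
    exact hj.2.2
  -- stages after i0 do not touch position i0
  have hlater : (pvSort rules u).getD i0 0 = (pvWhile rules (pvFuel u) u i0).getD i0 0 := by
    rw [hfold, hpre0]
    apply foldl_getD_lt
    intro i hi
    obtain ⟨x, _, hx⟩ := List.mem_map.mp hi
    omega
  intro heq
  have hfin : ((pvSort rules u).getD i0 0, u.getD i0 0) ∈ rules := by
    rw [hlater]; exact hstage
  rw [heq] at hfin
  exact goodUpd_irrefl hg _ (getD_mem u i0 hi0u) hfin

-- ===== simulation: pvReorder (port B's zipper recursion) computes pvSort (port A's passes) =====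

lemma getD_append_cons (p t : List Int) (x : Int) : (p ++ x :: t).getD p.length 0 = x := by
  simp [List.getD]

lemma getD_drop (s : List Int) (j m : Nat) : (s.drop j).getD m 0 = s.getD (j + m) 0 := by
  simp [List.getD, List.getElem?_drop]

lemma drop_append_cons (p t : List Int) (x : Int) : (p ++ x :: t).drop (p.length + 1) = t := by
  have h1 : p.length + 1 = p.length + 1 := rfl
  rw [show p.length + 1 = p.length + (0 + 1) by omega, ← List.drop_drop, List.drop_append_of_le_length (le_refl _)]
  simp

lemma pvFindJ_none_of_fail (rules : List (Int × Int)) (s : List Int) (i j : Nat)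
    (h : ∀ y ∈ s.drop j, (y, s.getD i 0) ∉ rules) : pvFindJ rules s i j = none := by
  fun_induction pvFindJ rules s i j with
  | case1 j h1 h2 =>
    exfalso
    have hm : s.getD j 0 ∈ s.drop j := by
      have := getD_drop s j 0
      rw [Nat.add_zero] at this
      rw [← this]
      exact getD_mem _ 0 (by simp; omega)
    exact h _ hm h2
  | case2 j h1 h2 ih =>
    apply ih
    intro y hy
    apply h
    have hdd : s.drop (j + 1) = (s.drop j).drop 1 := by rw [List.drop_drop]
    rw [hdd] at hy
    exact List.mem_of_mem_drop hy
  | case3 => rfl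

lemma pvFindJ_first (rules : List (Int × Int)) (s : List Int) (i : Nat) (y0 : Int)
    (hy : (y0, s.getD i 0) ∈ rules) :
    ∀ (sc : List Int) (j : Nat), s.drop j = sc ++ y0 :: (s.drop (j + sc.length + 1)) →
      (∀ y ∈ sc, (y, s.getD i 0) ∉ rules) → pvFindJ rules s i j = some (j + sc.length) := by
  intro sc
  induction sc with
  | nil =>
    intro j hd _
    have hlen : j < s.length := by
      by_contra hge
      rw [List.drop_eq_nil_of_le (by omega)] at hd
      simp at hd
    have hg : s.getD j 0 = y0 := by
      rw [show j = j + 0 by omega, ← getD_drop, hd]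
      rfl
    rw [pvFindJ, if_pos hlen, hg, if_pos hy]
    simp
  | cons a sc ih =>
    intro j hd hfail
    have hlen : j < s.length := by
      by_contra hge
      rw [List.drop_eq_nil_of_le (by omega)] at hd
      simp at hd
    have hg : s.getD j 0 = a := by
      rw [show j = j + 0 by omega, ← getD_drop, hd]
      rfl
    have hfa : (s.getD j 0, s.getD i 0) ∉ rules := by rw [hg]; exact hfail a (by simp)
    rw [pvFindJ, if_pos hlen, if_neg hfa]
    have hd' : s.drop (j + 1) = sc ++ y0 :: s.drop ((j + 1) + sc.length + 1) := by
      have h1 : s.drop (j + 1) = (s.drop j).drop 1 := by rw [List.drop_drop]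
      have harith : j + (a :: sc).length + 1 = (j + 1) + sc.length + 1 := by
        simp only [List.length_cons]; omega
      rw [h1, hd, harith]
      simp
    have := ih (j + 1) hd' (fun y hy' => hfail y (by simp [hy']))
    rw [this]
    congr 1
    simp only [List.length_cons]
    omega

lemma set_append_cons (p t : List Int) (x v : Int) :
    (p ++ x :: t).set p.length v = p ++ v :: t := by
  rw [List.set_append]
  simp

lemma pvSwap_zipper (p sc rest' : List Int) (x y : Int) :
    pvSwap (p ++ x :: (sc ++ y :: rest')) p.length (p.length + 1 + sc.length)
      = p ++ y :: (sc ++ x :: rest') := by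
  unfold pvSwap
  have hgi : (p ++ x :: (sc ++ y :: rest')).getD p.length 0 = x := getD_append_cons _ _ _
  have hgj : (p ++ x :: (sc ++ y :: rest')).getD (p.length + 1 + sc.length) 0 = y := by
    have : p ++ x :: (sc ++ y :: rest') = (p ++ x :: sc) ++ y :: rest' := by simp
    rw [this, show p.length + 1 + sc.length = (p ++ x :: sc).length by simp; omega]
    exact getD_append_cons _ _ _
  rw [hgi, hgj, set_append_cons]
  have : p ++ y :: (sc ++ y :: rest') = (p ++ y :: sc) ++ y :: rest' := by simp
  rw [this, show p.length + 1 + sc.length = (p ++ y :: sc).length by simp; omega,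
    set_append_cons]
  simp

-- characterization of a scan that exhausts rest: nothing in rest precedes x
lemma pvScan_inl (rules : List (Int × Int)) (x : Int) :
    ∀ (rest scanned : List Int) (r : Int × List Int),
      pvScan rules x scanned rest = Sum.inl r →
      r = (x, scanned ++ rest) ∧ ∀ y ∈ rest, (y, x) ∉ rules := by
  intro rest
  induction rest with
  | nil => intro scanned r h; rw [pvScan] at h; simp at h; simp [h]
  | cons y rest' ih =>
    intro scanned r h
    rw [pvScan] at h
    by_cases hin : (y, x) ∈ rules
    · simp [hin] at h
    · rw [if_neg hin] at h
      obtain ⟨h1, h2⟩ := ih (scanned ++ [y]) r h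
      refine ⟨by simpa using h1, ?_⟩
      intro z hz
      rcases List.mem_cons.mp hz with rfl | hz
      · exact hin
      · exact h2 z hz

-- characterization of a scan that finds a swap: rest splits as sc ++ y :: tail with sc failing
lemma pvScan_inr (rules : List (Int × Int)) (x : Int) :
    ∀ (rest scanned : List Int) (y : Int) (seg : List Int),
      pvScan rules x scanned rest = Sum.inr (y, seg) →
      ∃ sc tail, rest = sc ++ y :: tail ∧ (∀ z ∈ sc, (z, x) ∉ rules) ∧ (y, x) ∈ rules ∧
        seg = (scanned ++ sc) ++ x :: tail := by
  intro rest
  induction rest with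
  | nil => intro scanned y seg h; rw [pvScan] at h; simp at h
  | cons w rest' ih =>
    intro scanned y seg h
    rw [pvScan] at h
    by_cases hin : (w, x) ∈ rules
    · rw [if_pos hin] at h
      simp at h
      obtain ⟨rfl, rfl⟩ := h
      exact ⟨[], rest', by simp, by simp, hin, by simp⟩
    · rw [if_neg hin] at h
      obtain ⟨sc, tail, hrest, hfail, hy, hseg⟩ := ih (scanned ++ [w]) y seg h
      refine ⟨w :: sc, tail, by simp [hrest], ?_, hy, by simpa using hseg⟩
      intro z hz
      rcases List.mem_cons.mp hz with rfl | hz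
      · exact hin
      · exact hfail z hz

lemma pvSettle_snd_length (rules : List (Int × Int)) :
    ∀ (fuel : Nat) (x : Int) (rest : List Int),
      (pvSettle rules fuel x rest).2.length = rest.length := by
  intro fuel
  induction fuel with
  | zero =>
    intro x rest
    rw [pvSettle]
    cases h : pvScan rules x [] rest with
    | inl r => obtain ⟨rfl, -⟩ := pvScan_inl rules x rest [] r h; simp
    | inr p => obtain ⟨y, seg⟩ := p; simp
  | succ fuel ih =>
    intro x rest
    rw [pvSettle]
    cases h : pvScan rules x [] rest with
    | inl r => obtain ⟨rfl, -⟩ := pvScan_inl rules x rest [] r h; simp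
    | inr p =>
      obtain ⟨y, seg⟩ := p
      obtain ⟨sc, tail, hrest, -, -, hseg⟩ := pvScan_inr rules x rest [] y seg h
      simp only []
      rw [ih y seg, hseg, hrest]
      simp

-- one full 'while swap' stage of port A equals one pvSettle run of port B
lemma pvSettle_while (rules : List (Int × Int)) :
    ∀ (fuel : Nat) (x : Int) (rest p : List Int),
      pvWhile rules fuel (p ++ x :: rest) p.length
        = p ++ (pvSettle rules fuel x rest).1 :: (pvSettle rules fuel x rest).2 := by
  intro fuel
  induction fuel with
  | zero =>
    intro x rest p
    rw [pvSettle]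
    cases h : pvScan rules x [] rest with
    | inl r =>
      obtain ⟨rfl, hfail⟩ := pvScan_inl rules x rest [] r h
      have hnone : pvFindJ rules (p ++ x :: rest) p.length (p.length + 1) = none := by
        apply pvFindJ_none_of_fail
        rw [drop_append_cons, getD_append_cons]
        exact hfail
      simp [pvWhile, hnone]
    | inr q =>
      obtain ⟨y, seg⟩ := q
      obtain ⟨sc, tail, hrest, hfail, hy, hseg⟩ := pvScan_inr rules x rest [] y seg h
      subst hrest
      have hfind : pvFindJ rules (p ++ x :: (sc ++ y :: tail)) p.length (p.length + 1)
          = some (p.length + 1 + sc.length) := by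
        have hgi := getD_append_cons p (sc ++ y :: tail) x
        have := pvFindJ_first rules (p ++ x :: (sc ++ y :: tail)) p.length y
          (by rw [hgi]; exact hy) sc (p.length + 1)
          (by rw [drop_append_cons]
              congr 1
              have : p.length + 1 + sc.length + 1 = (p ++ x :: sc).length + 1 := by
                simp only [List.length_append, List.length_cons]; omega
              rw [this, show p ++ x :: (sc ++ y :: tail) = (p ++ x :: sc) ++ y :: tail
                by simp, drop_append_cons])
          (by rw [hgi]; exact hfail)
        exact this
      simp [pvWhile, hfind]
  | succ fuel ih =>
    intro x rest p
    rw [pvSettle]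
    cases h : pvScan rules x [] rest with
    | inl r =>
      obtain ⟨rfl, hfail⟩ := pvScan_inl rules x rest [] r h
      have hnone : pvFindJ rules (p ++ x :: rest) p.length (p.length + 1) = none := by
        apply pvFindJ_none_of_fail
        rw [drop_append_cons, getD_append_cons]
        exact hfail
      simp [pvWhile, hnone]
    | inr q =>
      obtain ⟨y, seg⟩ := q
      obtain ⟨sc, tail, hrest, hfail, hy, hseg⟩ := pvScan_inr rules x rest [] y seg h
      subst hrest
      have hfind : pvFindJ rules (p ++ x :: (sc ++ y :: tail)) p.length (p.length + 1)
          = some (p.length + 1 + sc.length) := by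
        have hgi := getD_append_cons p (sc ++ y :: tail) x
        have := pvFindJ_first rules (p ++ x :: (sc ++ y :: tail)) p.length y
          (by rw [hgi]; exact hy) sc (p.length + 1)
          (by rw [drop_append_cons]
              congr 1
              have : p.length + 1 + sc.length + 1 = (p ++ x :: sc).length + 1 := by
                simp only [List.length_append, List.length_cons]; omega
              rw [this, show p ++ x :: (sc ++ y :: tail) = (p ++ x :: sc) ++ y :: tail
                by simp, drop_append_cons])
          (by rw [hgi]; exact hfail)
        exact this
      have hstep : pvWhile rules (fuel + 1) (p ++ x :: (sc ++ y :: tail)) p.length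
          = pvWhile rules fuel
              (pvSwap (p ++ x :: (sc ++ y :: tail)) p.length (p.length + 1 + sc.length))
              p.length := by
        simp [pvWhile, hfind]
      rw [hstep, pvSwap_zipper]
      have := ih y seg p
      rw [hseg] at this
      simp only [List.nil_append] at this
      rw [hseg]
      exact this

lemma pvWhile_length (rules : List (Int × Int)) (fuel : Nat) (s : List Int) (i : Nat) :
    (pvWhile rules fuel s i).length = s.length := by
  fun_induction pvWhile rules fuel s i with
  | case1 => rfl
  | case2 => rfl
  | case3 s j fuel' hfind ih => rw [ih, pvSwap_length]

lemma pvWhile_last (rules : List (Int × Int)) (fuel : Nat) (s : List Int) (i : Nat)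
    (h : s.length ≤ i + 1) : pvWhile rules fuel s i = s := by
  have hnone : pvFindJ rules s i (i + 1) = none := by
    rw [pvFindJ, if_neg (by omega)]
  cases fuel <;> simp [pvWhile, hnone]

lemma foldl_range'_reorder (rules : List (Int × Int)) (fuel : Nat) :
    ∀ (n : Nat) (seg p : List Int), seg.length = n →
    (List.range' p.length n).foldl (fun s i => pvWhile rules fuel s i) (p ++ seg)
      = p ++ pvReorderN rules fuel n seg := by
  intro n
  induction n with
  | zero =>
    intro seg p hlen
    rw [List.length_eq_zero_iff.mp hlen]
    simp [pvReorderN]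
  | succ n ih =>
    intro seg p hlen
    cases seg with
    | nil => simp at hlen
    | cons x rest =>
      have hr : List.range' p.length (n + 1) = p.length :: List.range' (p.length + 1) n := by
        simp [List.range'_succ]
      rw [hr]
      simp only [List.foldl]
      rw [pvSettle_while rules fuel x rest p]
      have hassoc : p ++ (pvSettle rules fuel x rest).1 :: (pvSettle rules fuel x rest).2
          = (p ++ [(pvSettle rules fuel x rest).1]) ++ (pvSettle rules fuel x rest).2 := by
        simp
      have hplen : (p ++ [(pvSettle rules fuel x rest).1]).length = p.length + 1 := by simp
      rw [hassoc, ← hplen,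
        ih (pvSettle rules fuel x rest).2 (p ++ [(pvSettle rules fuel x rest).1])
          (by rw [pvSettle_snd_length]; simp at hlen ⊢; omega)]
      rw [pvReorderN]
      simp

lemma pvSort_eq_pvReorder (rules : List (Int × Int)) (u : List Int) :
    pvSort rules u = pvReorder rules (pvFuel u) u := by
  cases u with
  | nil => simp [pvSort, pvReorder, pvReorderN]
  | cons a t =>
    have hfull := foldl_range'_reorder rules (pvFuel (a :: t)) (a :: t).length (a :: t) [] rfl
    simp only [List.nil_append, List.length_nil] at hfull
    rw [pvReorder, ← hfull]
    unfold pvSort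
    rw [List.range_eq_range']
    have hlen : (a :: t).length = ((a :: t).length - 1) + 1 := by simp
    rw [show List.range' 0 (a :: t).length = List.range' 0 (((a :: t).length - 1) + 1) by rw [← hlen]]
    rw [List.range'_1_concat, List.foldl_append]
    simp only [List.foldl]
    rw [pvWhile_last]
    have : ∀ (l : List Nat) (r : List Int),
        (l.foldl (fun s i => pvWhile rules (pvFuel (a :: t)) s i) r).length = r.length := by
      intro l
      induction l with
      | nil => intro r; rfl
      | cons i l ihl => intro r; simp only [List.foldl]; rw [ihl, pvWhile_length]
    rw [this]
    simp

lemma sum_mids_loop (rules : List (Int × Int)) (updates : List (List Int))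
    (hpre : ∀ u ∈ updates, GoodUpd rules u = true) : ∀ (gb : Int × Int),
    updates.foldl
      (fun gb u =>
        if pvCheck rules u then (gb.1 + pvMid u, gb.2)
        else (gb.1, gb.2 + pvMid (pvSort rules u))) gb
    = updates.foldl
      (fun gb u =>
        let v := pvReorder rules (pvFuel u) u
        let m := v.getD (v.length / 2) 0
        if v = u then (gb.1 + m, gb.2) else (gb.1, gb.2 + m)) gb := by
  induction updates with
  | nil => intro gb; rfl
  | cons u updates ih =>
    intro gb
    have hgu : GoodUpd rules u = true := hpre u (by simp)
    have hrest : ∀ w ∈ updates, GoodUpd rules w = true := fun w hw => hpre w (by simp [hw])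
    simp only [List.foldl]
    rw [ih hrest]
    congr 1
    rw [← pvSort_eq_pvReorder]
    by_cases hchk : pvCheck rules u = true
    · rw [if_pos hchk, pvSort_of_check rules u hchk]
      simp [pvMid]
    · have hne := pvSort_ne_of_check_false rules u hgu (by simpa using hchk)
      rw [if_neg hchk, if_neg hne]
      simp [pvMid]

-- ===== VERDICT (by name: the statement is the Claim_ definition above) =====
theorem sum_mids_spec : Claim_equal_sum_mids := by
  intro rules updates _ hpre
  unfold Spec_sum_mids sum_mids sum_mids_alt
  unfold Pre_sum_mids at hpre
  rw [List.all_eq_true] at hpre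
  exact sum_mids_loop rules updates hpre (0, 0)
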